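-- pv_equiv track=rewrite | github.com/Marianape1917/Gastronomy-AI-Evaluation | scripts/segmentacion_int.py | get_dish_and_role
-- ===== SOURCE A (Python) =====
-- def get_dish_and_role(image_path):
--     parts = [p for p in image_path.split('/') if p.strip()]
--     dish = None
--     role = None
--
--     roles = ['chef', 'bueno', 'malo', 'feo']
--     for part in parts:
--         if part.lower() in roles:
--             role = part.lower()
--         elif len(part) > 0 and part[0].isupper() and not dish:
--             dish = part
--
--     if not dish:
--         dish = "Desconocido"
--     if not role:
--         role = "sin_clasificar"
--
--     return dish, role
-- ===== SOURCE B (Python) =====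
-- def get_dish_and_role(image_path):
--     parts = [p for p in image_path.split('/') if p.strip()]
--     roles = ('chef', 'bueno', 'malo', 'feo')
--     # role: LAST part that is a role (scan reversed, take first hit)
--     role = next((p.lower() for p in reversed(parts) if p.lower() in roles),
--                 'sin_clasificar')
--     # dish: FIRST non-role part starting with an uppercase letter
--     dish = next((p for p in parts if p and p[0].isupper() and p.lower() not in roles),
--                 'Desconocido')
--     return dish, role
-- ===== Notes on version B (the rewrite author's own statement) =====
-- stated objective: simpler
-- what changed: Replaces the single stateful if/elif loop over parts with two independent declarative passes: role = first role-match scanning the parts in reverse (last wins), dish = first non-role part whose first character is uppercase, each with next(...) and a default.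
import Mathlib
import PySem

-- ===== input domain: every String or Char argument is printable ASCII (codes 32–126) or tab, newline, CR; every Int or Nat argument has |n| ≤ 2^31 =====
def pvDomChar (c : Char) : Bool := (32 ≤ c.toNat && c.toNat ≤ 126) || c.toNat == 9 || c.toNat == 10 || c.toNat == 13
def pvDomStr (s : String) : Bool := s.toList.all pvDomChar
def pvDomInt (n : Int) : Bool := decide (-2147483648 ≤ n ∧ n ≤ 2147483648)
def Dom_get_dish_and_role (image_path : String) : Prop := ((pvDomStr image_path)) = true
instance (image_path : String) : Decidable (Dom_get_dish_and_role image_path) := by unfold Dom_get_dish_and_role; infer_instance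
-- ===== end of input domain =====

-- B replaces A's single stateful if/elif loop by two independent declarative passes
-- (role = last match scanning reversed parts, dish = first non-role uppercase part); objective: simpler.

-- ===== PORT A =====
def pvRoles : List String := ["chef", "bueno", "malo", "feo"]

-- one iteration of A's for-loop over (dish, role) state
def pvStepA (st : Option String × Option String) (part : String) : Option String × Option String :=
  if pvRoles.contains (PySem.Str.lower part) then
    (st.1, some (PySem.Str.lower part))
  else if 0 < PySem.Str.len part ∧
          (match PySem.Str.pyGet? part 0 with
           | some c => PySem.Chars.isupper c
           | none => false) = true ∧ st.1 = none then
    (some part, st.2)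
  else
    st

def get_dish_and_role (image_path : String) : String × String :=
  let parts := ((PySem.Str.split? image_path "/").getD []).filter
    (fun p => !(PySem.Str.strip p == ""))
  let st := parts.foldl pvStepA (none, none)
  (st.1.getD "Desconocido", st.2.getD "sin_clasificar")

-- ===== PORT B =====
def pvIsRoleB (p : String) : Bool := pvRoles.contains (PySem.Str.lower p)

def pvDishCondB (p : String) : Bool :=
  !(p == "") &&
  (match p.toList with
   | c :: _ => PySem.Chars.isupper c
   | [] => false) &&
  !(pvIsRoleB p)

def get_dish_and_role_alt (image_path : String) : String × String :=
  let parts := ((PySem.Str.split? image_path "/").getD []).filter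
    (fun p => !(PySem.Str.strip p == ""))
  let role := ((parts.reverse.find? pvIsRoleB).map PySem.Str.lower).getD "sin_clasificar"
  let dish := (parts.find? pvDishCondB).getD "Desconocido"
  (dish, role)

-- ===== PRECONDITION & SPEC =====
def Spec_get_dish_and_role (image_path : String) (out : String × String) : Prop := out = get_dish_and_role_alt image_path
instance (image_path : String) (out : String × String) : Decidable (Spec_get_dish_and_role image_path out) := by unfold Spec_get_dish_and_role; infer_instance

-- ===== CLAIM (what is proved, stated in full; the proofs are below) =====
def Claim_equal_get_dish_and_role : Prop := ∀ (image_path : String), Dom_get_dish_and_role image_path → Spec_get_dish_and_role image_path (get_dish_and_role image_path)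

-- ===== LEMMAS AND PROOFS =====

-- A's dish condition in the elif (first-char-uppercase) equals B's dish condition once
-- the role branch is excluded.
lemma dishCond_eq (p : String) :
    (!(pvRoles.contains (PySem.Str.lower p)) &&
      (decide (0 < PySem.Str.len p) &&
        (match PySem.Str.pyGet? p 0 with
         | some c => PySem.Chars.isupper c
         | none => false))) = pvDishCondB p := by
  by_cases hp : p = ""
  · subst hp; decide
  · have hl : p.toList ≠ [] := by simpa using hp
    obtain ⟨c, cs, hcs⟩ := List.exists_cons_of_ne_nil hl
    have hpe : (p == "") = false := by simpa using hp
    simp only [pvDishCondB, pvIsRoleB, PySem.Str.len_eq, PySem.Str.pyGet?_eq, hcs, hpe]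
    simp [PySem.List.pyGet?, PySem.List.pyIdx?, PySem.Chars.pyGet?, Bool.and_comm]

-- characterisation of A's loop: the final dish is the already-found one, else the first
-- non-role uppercase part; the final role is the lowered last role part, else the incoming one.
lemma loopA_char (ps : List String) (d r : Option String) :
    ps.foldl pvStepA (d, r) =
      (d.or (ps.find? pvDishCondB),
       ((ps.reverse.find? pvIsRoleB).map PySem.Str.lower).or r) := by
  induction ps generalizing d r with
  | nil => simp
  | cons p ps ih =>
      simp only [List.foldl_cons, List.reverse_cons, pvStepA]
      by_cases hr : pvRoles.contains (PySem.Str.lower p) = true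
      · rw [if_pos hr, ih]
        have hr' : pvIsRoleB p = true := hr
        have hB : pvDishCondB p = false := by
          rw [← dishCond_eq, hr]; simp
        rw [Prod.mk.injEq]
        refine ⟨by rw [List.find?_cons, hB], ?_⟩
        rw [List.find?_append]
        cases hf : ps.reverse.find? pvIsRoleB with
        | some q => simp
        | none => simp [hr']
      · rw [if_neg hr]
        have hc : pvRoles.contains (PySem.Str.lower p) = false := by
          cases hcb : pvRoles.contains (PySem.Str.lower p) with
          | true => exact absurd hcb hr
          | false => rfl
        have hr' : pvIsRoleB p = false := hc
        have hnr : (!pvRoles.contains (PySem.Str.lower p)) = true := by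
          rw [hc]; rfl
        by_cases hd : (0 < PySem.Str.len p ∧
            (match PySem.Str.pyGet? p 0 with
             | some c => PySem.Chars.isupper c
             | none => false) = true ∧ d = none)
        · rw [if_pos hd, ih]
          obtain ⟨h1, h2, h3⟩ := hd
          have hB : pvDishCondB p = true := by
            rw [← dishCond_eq, hnr, Bool.true_and, decide_eq_true h1, Bool.true_and, h2]
          subst h3
          rw [Prod.mk.injEq]
          refine ⟨by simp [hB], ?_⟩
          rw [List.find?_append]
          cases hf : ps.reverse.find? pvIsRoleB with
          | some q => simp
          | none => simp [hr']
        · rw [if_neg hd, ih]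
          rw [Prod.mk.injEq]
          constructor
          · -- dish component
            cases hdo : d with
            | some x => simp
            | none =>
                have hB : pvDishCondB p = false := by
                  rw [← dishCond_eq, hnr, Bool.true_and]
                  subst hdo
                  push Not at hd
                  by_cases h1 : 0 < PySem.Str.len p
                  · cases h2' : (match PySem.Str.pyGet? p 0 with
                      | some c => PySem.Chars.isupper c
                      | none => false) with
                    | true => exact absurd rfl (hd h1 h2')
                    | false => exact Bool.and_false _
                  · have hz : decide (0 < PySem.Str.len p) = false := by
                      simpa using h1
                    rw [hz, Bool.false_and]
                rw [List.find?_cons, hB]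
          · -- role component
            rw [List.find?_append]
            cases hf : ps.reverse.find? pvIsRoleB with
            | some q => simp
            | none => simp [hr']

-- ===== VERDICT (by name: the statement is the Claim_ definition above) =====
theorem get_dish_and_role_spec : Claim_equal_get_dish_and_role := by
  intro image_path _
  unfold Spec_get_dish_and_role get_dish_and_role get_dish_and_role_alt
  simp only [loopA_char, Option.none_or, Option.or_none]
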